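-- pv_equiv track=rewrite | github.com/huikinglam02gmail/Leetcode_solutions | 2509.cycle-length-queries-in-a-tree.py | cycleLengthQueries
-- ===== SOURCE A (Python) =====
-- from typing import List
--
-- def cycleLengthQueries(n: int, queries: List[List[int]]) -> List[int]:
--     result = []
--     for a, b in queries:
--         aDict = {}
--         aCount = 0
--         while a != 0:
--             aDict[a] = aCount
--             aCount += 1
--             a //= 2
--         bCount = 0
--         while b not in aDict:
--             bCount += 1
--             b //= 2
--         result.append(1 + aDict[b] + bCount)
--     return result
-- ===== SOURCE B (Python) =====
-- def cycleLengthQueries(n, queries):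
--     result = []
--     for a, b in queries:
--         steps = 0
--         while a != b:
--             if a > b:
--                 a //= 2
--             else:
--                 b //= 2
--             steps += 1
--         result.append(steps + 1)
--     return result
-- ===== Notes on version B (the rewrite author's own statement) =====
-- stated objective: simpler
-- what changed: Replaces A's two sequential climbs (build a dict of all of a's ancestors, then climb b until it hits the dict) by a single interleaved two-pointer climb that steps the larger node up one level until the two meet, keeping only two integers and one counter.
import Mathlib
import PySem

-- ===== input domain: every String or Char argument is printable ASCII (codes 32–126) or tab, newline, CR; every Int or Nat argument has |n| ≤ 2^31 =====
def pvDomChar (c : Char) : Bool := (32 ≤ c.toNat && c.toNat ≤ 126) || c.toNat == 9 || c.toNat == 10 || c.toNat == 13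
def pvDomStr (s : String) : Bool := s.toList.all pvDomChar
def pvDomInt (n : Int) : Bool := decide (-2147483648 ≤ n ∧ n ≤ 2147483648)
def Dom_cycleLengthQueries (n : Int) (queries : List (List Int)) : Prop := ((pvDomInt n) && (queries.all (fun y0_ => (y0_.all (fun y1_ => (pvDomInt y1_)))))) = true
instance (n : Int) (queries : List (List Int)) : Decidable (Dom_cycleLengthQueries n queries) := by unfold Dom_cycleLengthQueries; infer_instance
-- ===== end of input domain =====

-- B replaces A's dict of a's ancestors + second climb of b by one interleaved
-- two-pointer climb of the larger node; objective: simpler (O(1) extra space per query).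
-- Python A diverges on queries with a non-positive endpoint and raises ValueError on
-- queries not of length 2: Pre_ excludes exactly those.
-- Each loop is ported with a Nat fuel argument; the fuel is a totality guard only: on
-- every input admitted by Pre_ it is large enough that the guard is never the reason a
-- loop stops (proved by the fuel-irrelevance lemmas below the claim block).

-- ===== PORT A =====
-- 'while a != 0: aDict[a] = aCount; aCount += 1; a //= 2'.  For a < 0 the Python loop
-- diverges (outside Pre_), so the 'a ≤ 0' test equals Python's 'a != 0' on Pre_.
def pvBuildF : Nat → Int → Int → PySem.Dict Int Int → PySem.Dict Int Int
  | 0, _, _, d => d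
  | fuel + 1, a, c, d =>
    if a ≤ 0 then d
    else pvBuildF fuel (PySem.Int.floordiv a 2) (c + 1) (d.insert a c)

def pvBuild (a : Int) (c : Int) (d : PySem.Dict Int Int) : PySem.Dict Int Int :=
  pvBuildF (a.toNat + 1) a c d

-- 'while b not in aDict: bCount += 1; b //= 2' followed by 'aDict[b] + bCount' (the
-- leading '1 +' is added by the caller).  For b ≤ 0 with a miss the Python loop
-- diverges (the dict keys are positive; outside Pre_).
def pvFindF : Nat → PySem.Dict Int Int → Int → Int → Int
  | 0, _, _, _ => 0
  | fuel + 1, d, b, c =>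
    match d.get? b with
    | some v => v + c
    | none =>
      if b ≤ 0 then 0
      else pvFindF fuel d (PySem.Int.floordiv b 2) (c + 1)

def pvFind (d : PySem.Dict Int Int) (b : Int) (c : Int) : Int :=
  pvFindF (b.toNat + 1) d b c

-- queries whose length is not 2 raise ValueError in Python (excluded by Pre_).
def cycleLengthQueries (n : Int) (queries : List (List Int)) : List Int :=
  queries.foldl
    (fun result q =>
      match q with
      | [a, b] => result ++ [1 + pvFind (pvBuild a 0 PySem.Dict.empty) b 0]
      | _ => result)
    []

-- ===== PORT B =====
-- 'while a != b: if a > b: a //= 2 else: b //= 2; steps += 1'.  For a negative endpoint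
-- the Python loop diverges (outside Pre_), hence the negativity test in the guard.
def pvClimbF : Nat → Int → Int → Int → Int
  | 0, _, _, steps => steps
  | fuel + 1, a, b, steps =>
    if a < 0 ∨ b < 0 then steps
    else if a = b then steps
    else if a > b then pvClimbF fuel (PySem.Int.floordiv a 2) b (steps + 1)
    else pvClimbF fuel a (PySem.Int.floordiv b 2) (steps + 1)

def pvClimb (a : Int) (b : Int) (steps : Int) : Int :=
  pvClimbF (a.toNat + b.toNat + 1) a b steps

-- 'for a, b in queries' read as q[0], q[1]; on Pre_ every q is exactly [a, b]
def cycleLengthQueries_alt (n : Int) (queries : List (List Int)) : List Int :=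
  queries.map (fun q => pvClimb (q.headD 0) ((q.drop 1).headD 0) 0 + 1)

-- ===== PRECONDITION & SPEC =====
-- Pre_ excludes exactly the inputs where Python A does not return: queries not of length 2
-- (ValueError on unpacking) and queries containing a non-positive node (infinite loop).
def Pre_cycleLengthQueries (n : Int) (queries : List (List Int)) : Prop :=
  ∀ q ∈ queries, q.length = 2 ∧ ∀ x ∈ q, 1 ≤ x
instance (n : Int) (queries : List (List Int)) : Decidable (Pre_cycleLengthQueries n queries) := by
  unfold Pre_cycleLengthQueries; infer_instance

def pvWitness_cycleLengthQueries : Int × List (List Int) := (3, [[5, 3], [4, 7], [1, 1]])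

def Spec_cycleLengthQueries (n : Int) (queries : List (List Int)) (out : List Int) : Prop := out = cycleLengthQueries_alt n queries
instance (n : Int) (queries : List (List Int)) (out : List Int) : Decidable (Spec_cycleLengthQueries n queries out) := by unfold Spec_cycleLengthQueries; infer_instance

-- ===== CLAIM (what is proved, stated in full; the proofs are below) =====
def Claim_equal_cycleLengthQueries : Prop := ∀ (n : Int) (queries : List (List Int)), Dom_cycleLengthQueries n queries → Pre_cycleLengthQueries n queries → Spec_cycleLengthQueries n queries (cycleLengthQueries n queries)

-- ===== LEMMAS AND PROOFS =====

-- fuel irrelevance: with enough fuel, each loop's value does not depend on the fuel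
theorem pvBuildF_fuel : ∀ (f g : Nat) (a c : Int) (d : PySem.Dict Int Int),
    a.toNat < f → a.toNat < g → pvBuildF f a c d = pvBuildF g a c d := by
  intro f
  induction f with
  | zero => intro g a c d hf; omega
  | succ m ih =>
    intro g a c d hf hg
    cases g with
    | zero => omega
    | succ k =>
      rw [pvBuildF, pvBuildF]
      by_cases ha : a ≤ 0
      · rw [if_pos ha, if_pos ha]
      · rw [if_neg ha, if_neg ha]
        have h2 : PySem.Int.floordiv a 2 = a / 2 := PySem.Int.floordiv_eq_ediv_of_pos (by omega)
        exact ih k _ _ _ (by rw [h2]; omega) (by rw [h2]; omega)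

theorem pvBuild_base (a c : Int) (d : PySem.Dict Int Int) (ha : a ≤ 0) :
    pvBuild a c d = d := by
  rw [pvBuild, pvBuildF, if_pos ha]

theorem pvBuild_step (a c : Int) (d : PySem.Dict Int Int) (ha : 1 ≤ a) :
    pvBuild a c d = pvBuild (a / 2) (c + 1) (d.insert a c) := by
  have h2 : PySem.Int.floordiv a 2 = a / 2 := PySem.Int.floordiv_eq_ediv_of_pos (by omega)
  rw [pvBuild, pvBuildF, if_neg (by omega : ¬ a ≤ 0), h2, pvBuild]
  exact pvBuildF_fuel _ _ _ _ _ (by omega) (by omega)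

theorem pvFindF_fuel : ∀ (f g : Nat) (d : PySem.Dict Int Int) (b c : Int),
    b.toNat < f → b.toNat < g → pvFindF f d b c = pvFindF g d b c := by
  intro f
  induction f with
  | zero => intro g d b c hf; omega
  | succ m ih =>
    intro g d b c hf hg
    cases g with
    | zero => omega
    | succ k =>
      rw [pvFindF, pvFindF]
      cases d.get? b with
      | some v => rfl
      | none =>
        simp only
        by_cases hb : b ≤ 0
        · rw [if_pos hb, if_pos hb]
        · rw [if_neg hb, if_neg hb]
          have h2 : PySem.Int.floordiv b 2 = b / 2 := PySem.Int.floordiv_eq_ediv_of_pos (by omega)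
          exact ih k _ _ _ (by rw [h2]; omega) (by rw [h2]; omega)

theorem pvFind_hit (d : PySem.Dict Int Int) (b c v : Int) (h : d.get? b = some v) :
    pvFind d b c = v + c := by
  rw [pvFind, pvFindF, h]

theorem pvFind_miss (d : PySem.Dict Int Int) (b c : Int) (h : d.get? b = none) (hb : 1 ≤ b) :
    pvFind d b c = pvFind d (b / 2) (c + 1) := by
  have h2 : PySem.Int.floordiv b 2 = b / 2 := PySem.Int.floordiv_eq_ediv_of_pos (by omega)
  rw [pvFind, pvFindF, h]
  simp only [if_neg (by omega : ¬ b ≤ 0), h2, pvFind]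
  exact pvFindF_fuel _ _ _ _ _ (by omega) (by omega)

theorem pvClimbF_fuel : ∀ (f g : Nat) (a b c : Int),
    a.toNat + b.toNat < f → a.toNat + b.toNat < g → pvClimbF f a b c = pvClimbF g a b c := by
  intro f
  induction f with
  | zero => intro g a b c hf; omega
  | succ m ih =>
    intro g a b c hf hg
    cases g with
    | zero => omega
    | succ k =>
      rw [pvClimbF, pvClimbF]
      by_cases hneg : a < 0 ∨ b < 0
      · rw [if_pos hneg, if_pos hneg]
      · rw [if_neg hneg, if_neg hneg]
        by_cases heq : a = b
        · rw [if_pos heq, if_pos heq]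
        · rw [if_neg heq, if_neg heq]
          by_cases hgt : a > b
          · rw [if_pos hgt, if_pos hgt]
            have ha1 : 1 ≤ a := by omega
            have h2 : PySem.Int.floordiv a 2 = a / 2 := PySem.Int.floordiv_eq_ediv_of_pos (by omega)
            exact ih k _ _ _ (by rw [h2]; omega) (by rw [h2]; omega)
          · rw [if_neg hgt, if_neg hgt]
            have hb1 : 1 ≤ b := by omega
            have h2 : PySem.Int.floordiv b 2 = b / 2 := PySem.Int.floordiv_eq_ediv_of_pos (by omega)
            exact ih k _ _ _ (by rw [h2]; omega) (by rw [h2]; omega)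

theorem pvClimb_eq (a b c : Int) (h : a = b) : pvClimb a b c = c := by
  rw [pvClimb, pvClimbF]
  by_cases hneg : a < 0 ∨ b < 0
  · rw [if_pos hneg]
  · rw [if_neg hneg, if_pos h]

theorem pvClimb_gt (a b c : Int) (ha : 1 ≤ a) (hb : 1 ≤ b) (hgt : a > b) :
    pvClimb a b c = pvClimb (a / 2) b (c + 1) := by
  have h2 : PySem.Int.floordiv a 2 = a / 2 := PySem.Int.floordiv_eq_ediv_of_pos (by omega)
  rw [pvClimb, pvClimbF, if_neg (by omega : ¬ (a < 0 ∨ b < 0)),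
      if_neg (by omega : ¬ a = b), if_pos hgt, h2, pvClimb]
  exact pvClimbF_fuel _ _ _ _ _ (by omega) (by omega)

theorem pvClimb_lt (a b c : Int) (ha : 1 ≤ a) (hb : 1 ≤ b) (hlt : a < b) :
    pvClimb a b c = pvClimb a (b / 2) (c + 1) := by
  have h2 : PySem.Int.floordiv b 2 = b / 2 := PySem.Int.floordiv_eq_ediv_of_pos (by omega)
  rw [pvClimb, pvClimbF, if_neg (by omega : ¬ (a < 0 ∨ b < 0)),
      if_neg (by omega : ¬ a = b), if_neg (by omega : ¬ a > b), h2, pvClimb]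
  exact pvClimbF_fuel _ _ _ _ _ (by omega) (by omega)

-- membership of x in the halving chain a, a//2, ..., 1
def isAnc (a : Int) (x : Int) : Bool :=
  if a ≤ 0 then false
  else if a = x then true
  else isAnc (a / 2) x
termination_by a.toNat
decreasing_by omega

-- index of x in that chain (meaningful when isAnc a x)
def ancIdx (a : Int) (x : Int) : Int :=
  if a ≤ 0 then 0
  else if a = x then 0
  else 1 + ancIdx (a / 2) x
termination_by a.toNat
decreasing_by omega

theorem isAnc_le (x : Int) : ∀ a : Int, isAnc a x = true → 1 ≤ x ∧ x ≤ a := by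
  intro a
  induction a using isAnc.induct x with
  | case1 a ha => intro h; rw [isAnc, if_pos ha] at h; simp at h
  | case2 ha => intro _; omega
  | case3 a ha hx ih =>
    intro h
    rw [isAnc, if_neg ha, if_neg hx] at h
    have := ih h; omega

theorem isAnc_one : ∀ a : Int, 1 ≤ a → isAnc a 1 = true := by
  intro a
  induction a using isAnc.induct 1 with
  | case1 a ha => intro h; omega
  | case2 ha => intro _; rw [isAnc, if_neg ha, if_pos rfl]
  | case3 a ha hx ih =>
    intro _
    rw [isAnc, if_neg ha, if_neg hx]
    exact ih (by omega)

-- the dict A builds maps exactly a's ancestors to their index in the chain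
theorem pvBuild_get? : ∀ (N : Nat) (a c : Int) (d : PySem.Dict Int Int), a.toNat ≤ N →
    (∀ k v, d.get? k = some v → a < k) → ∀ x,
    (pvBuild a c d).get? x = if isAnc a x then some (c + ancIdx a x) else d.get? x := by
  intro N
  induction N with
  | zero =>
    intro a c d hN hd x
    have ha : a ≤ 0 := by omega
    rw [pvBuild_base a c d ha, isAnc, if_pos ha]
    simp
  | succ m ih =>
    intro a c d hN hd x
    by_cases ha : a ≤ 0
    · rw [pvBuild_base a c d ha, isAnc, if_pos ha]
      simp
    · have hd' : ∀ k v, (d.insert a c).get? k = some v → a / 2 < k := by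
        intro k v hk
        rw [PySem.Dict.get?_insert] at hk
        by_cases hka : k = a
        · subst hka; omega
        · rw [if_neg hka] at hk
          have := hd k v hk; omega
      rw [pvBuild_step a c d (by omega), ih (a / 2) (c + 1) (d.insert a c) (by omega) hd' x]
      have hAx : isAnc a x = if a = x then true else isAnc (a / 2) x := by
        rw [isAnc, if_neg ha]
      have hIx : ancIdx a x = if a = x then 0 else 1 + ancIdx (a / 2) x := by
        rw [ancIdx, if_neg ha]
      rw [hAx, hIx]
      by_cases hxa : x = a
      · subst hxa
        have hfalse : isAnc (x / 2) x = false := by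
          by_contra hcon
          simp only [Bool.not_eq_false] at hcon
          have := isAnc_le x (x / 2) hcon
          omega
        simp [hfalse, PySem.Dict.get?_insert_self]
      · have hax : ¬ a = x := fun h => hxa h.symm
        by_cases hanc : isAnc (a / 2) x = true
        · simp only [hax, if_false, hanc, if_true]
          congr 1; ring
        · simp only [Bool.not_eq_true] at hanc
          simp only [hax, if_false, hanc, Bool.false_eq_true]
          exact PySem.Dict.get?_insert_of_ne d c hxa

theorem dictGet (a b : Int) (ha : 1 ≤ a) :
    (pvBuild a 0 PySem.Dict.empty).get? b
      = if isAnc a b then some (ancIdx a b) else none := by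
  rw [pvBuild_get? a.toNat a 0 PySem.Dict.empty le_rfl
      (by intro k v hk; rw [PySem.Dict.get?_empty] at hk; cases hk) b]
  simp [PySem.Dict.get?_empty]

-- one step of the b-climb, with the dict lookup resolved: hit
theorem pvFind_step_some (a b c : Int) (ha : 1 ≤ a) (hanc : isAnc a b = true) :
    pvFind (pvBuild a 0 PySem.Dict.empty) b c = ancIdx a b + c := by
  exact pvFind_hit _ b c _ (by rw [dictGet a b ha, hanc]; simp)

-- one step of the b-climb, with the dict lookup resolved: miss
theorem pvFind_step_none (a b c : Int) (ha : 1 ≤ a) (hb : 1 ≤ b) (hanc : isAnc a b = false) :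
    pvFind (pvBuild a 0 PySem.Dict.empty) b c
      = pvFind (pvBuild a 0 PySem.Dict.empty) (b / 2) (c + 1) := by
  exact pvFind_miss _ b c (by rw [dictGet a b ha, hanc]; simp) hb

-- the b-climb against dict(a) is one extra step plus the b-climb against dict(a/2), for b < a
theorem pvFind_shift : ∀ (N : Nat) (a b : Int), b.toNat ≤ N → 2 ≤ a → 1 ≤ b → b < a → ∀ c,
    pvFind (pvBuild a 0 PySem.Dict.empty) b c
      = pvFind (pvBuild (a / 2) 0 PySem.Dict.empty) b (c + 1) := by
  intro N
  induction N with
  | zero => intro a b hN; omega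
  | succ n ih =>
    intro a b hN ha hb hba c
    have ha2 : 1 ≤ a / 2 := by omega
    have hanc_eq : isAnc a b = isAnc (a / 2) b := by
      rw [isAnc, if_neg (by omega : ¬ a ≤ 0), if_neg (by omega : ¬ a = b)]
    have hidx : ancIdx a b = 1 + ancIdx (a / 2) b := by
      rw [ancIdx, if_neg (by omega : ¬ a ≤ 0), if_neg (by omega : ¬ a = b)]
    by_cases hanc : isAnc (a / 2) b = true
    · rw [pvFind_step_some a b c (by omega) (by rw [hanc_eq]; exact hanc),
          pvFind_step_some (a / 2) b (c + 1) ha2 hanc, hidx]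
      ring
    · simp only [Bool.not_eq_true] at hanc
      have hb2 : 2 ≤ b := by
        rcases (by omega : b = 1 ∨ 2 ≤ b) with h1 | h2
        · exfalso; rw [h1, isAnc_one (a / 2) ha2] at hanc; cases hanc
        · exact h2
      rw [pvFind_step_none a b c (by omega) hb (by rw [hanc_eq]; exact hanc),
          pvFind_step_none (a / 2) b (c + 1) ha2 hb hanc]
      exact ih a (b / 2) (by omega) ha (by omega) (by omega) (c + 1)

-- if b lies on a's ancestor chain, the interleaved climb walks a straight down to b
theorem pvClimb_anc (b : Int) (hb : 1 ≤ b) : ∀ a : Int, isAnc a b = true → ∀ c,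
    pvClimb a b c = ancIdx a b + c := by
  intro a
  induction a using isAnc.induct b with
  | case1 a ha => intro h; rw [isAnc, if_pos ha] at h; simp at h
  | case2 ha =>
    intro _ c
    rw [pvClimb_eq b b c rfl, ancIdx, if_neg (by omega), if_pos rfl]
    omega
  | case3 a ha hx ih =>
    intro h c
    rw [isAnc, if_neg ha, if_neg hx] at h
    have hble := isAnc_le b (a / 2) h
    have hIx : ancIdx a b = 1 + ancIdx (a / 2) b := by
      rw [ancIdx, if_neg ha, if_neg hx]
    rw [pvClimb_gt a b c (by omega) hb (by omega), ih h (c + 1), hIx]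
    ring

theorem pvFind_eq_pvClimb : ∀ (N : Nat) (a b : Int), a.toNat + b.toNat ≤ N → 1 ≤ a → 1 ≤ b → ∀ c,
    pvFind (pvBuild a 0 PySem.Dict.empty) b c = pvClimb a b c := by
  intro N
  induction N with
  | zero => intro a b hN; omega
  | succ n ih =>
    intro a b hN ha hb c
    by_cases hanc : isAnc a b = true
    · rw [pvFind_step_some a b c ha hanc, pvClimb_anc b hb a hanc c]
    · simp only [Bool.not_eq_true] at hanc
      have hne : a ≠ b := by
        intro hcon; subst hcon
        rw [isAnc, if_neg (by omega), if_pos rfl] at hanc; cases hanc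
      rcases lt_or_gt_of_ne hne with hlt | hgt
      · -- a < b : both climbs halve b
        have hb2 : 2 ≤ b := by omega
        rw [pvFind_step_none a b c ha hb hanc,
            ih a (b / 2) (by omega) ha (by omega) (c + 1),
            pvClimb_lt a b c ha hb hlt]
      · -- a > b : shift the dict to a/2, climb halves a
        have ha2 : 2 ≤ a := by omega
        rw [pvFind_shift b.toNat a b le_rfl ha2 hb hgt c,
            ih (a / 2) b (by omega) (by omega) hb (c + 1),
            pvClimb_gt a b c ha hb hgt]

theorem query_eq (a b : Int) (ha : 1 ≤ a) (hb : 1 ≤ b) :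
    1 + pvFind (pvBuild a 0 PySem.Dict.empty) b 0 = pvClimb a b 0 + 1 := by
  rw [pvFind_eq_pvClimb (a.toNat + b.toNat) a b le_rfl ha hb 0]
  ring

theorem foldl_map : ∀ (qs : List (List Int)) (acc : List Int),
    (∀ q ∈ qs, q.length = 2 ∧ ∀ x ∈ q, 1 ≤ x) →
    qs.foldl (fun result q =>
        match q with
        | [a, b] => result ++ [1 + pvFind (pvBuild a 0 PySem.Dict.empty) b 0]
        | _ => result) acc
      = acc ++ qs.map (fun q => pvClimb (q.headD 0) ((q.drop 1).headD 0) 0 + 1) := by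
  intro qs
  induction qs with
  | nil => intro acc _; simp
  | cons q qs ih =>
    intro acc hpre
    obtain ⟨hlen, hpos⟩ := hpre q (List.mem_cons_self)
    match q, hlen with
    | [a, b], _ =>
      simp only [List.foldl_cons, List.map_cons]
      rw [ih _ (fun q hq => hpre q (List.mem_cons_of_mem _ hq))]
      rw [query_eq a b (hpos a (by simp)) (hpos b (by simp))]
      simp

-- ===== VERDICT (by name: the statement is the Claim_ definition above) =====
theorem cycleLengthQueries_spec : Claim_equal_cycleLengthQueries := by
  intro n queries _ hpre
  unfold Spec_cycleLengthQueries cycleLengthQueries cycleLengthQueries_alt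
  rw [foldl_map queries [] hpre]
  simp
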